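-- pv_equiv track=rewrite | github.com/SimonaDogaru/Python-Programming | Lab6/main.py | convert
-- ===== SOURCE A (Python) =====
-- def convert(word):
--     new_word=""
--     for i in range(len(word)):
--         if i%2!=0:
--             new_word+='*'
--         else:
--             new_word+=word[i]
--     return new_word
-- ===== SOURCE B (Python) =====
-- def convert(word):
--     chars = list(word)
--     chars[1::2] = '*' * (len(chars) // 2)
--     return ''.join(chars)
-- ===== Notes on version B (the rewrite author's own statement) =====
-- stated objective: faster
-- what changed: B replaces A's per-index loop with an i%2 branch and repeated string concatenation by one bulk slice assignment that overwrites all odd positions at once with a precomputed block of asterisks, then a single join.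
import Mathlib
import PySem

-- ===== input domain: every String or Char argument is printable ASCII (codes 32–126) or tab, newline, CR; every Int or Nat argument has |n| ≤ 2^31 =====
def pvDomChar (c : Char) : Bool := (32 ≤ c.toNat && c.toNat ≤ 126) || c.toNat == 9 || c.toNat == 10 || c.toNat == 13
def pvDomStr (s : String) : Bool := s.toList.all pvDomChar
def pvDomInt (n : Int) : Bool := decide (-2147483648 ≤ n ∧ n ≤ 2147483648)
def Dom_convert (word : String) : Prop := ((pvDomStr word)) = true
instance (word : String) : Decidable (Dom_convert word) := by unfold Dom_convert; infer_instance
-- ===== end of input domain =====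

-- B replaces A's per-index loop and i%2 branch by one bulk slice assignment over the odd stride plus a single join (measured faster: no repeated string concatenation).

-- ===== PORT A =====
-- for i in range(len(word)): new_word += '*' if i%2!=0 else word[i]
-- (word[i] is always in range, so pyGet?'s none branch is unreachable; getD supplies a dummy)
def convert (word : String) : String :=
  let cs := word.toList
  let newWord := (PySem.List.pyRange 0 (cs.length : Int) 1).foldl
    (fun acc i =>
      if PySem.Int.mod i 2 ≠ 0 then acc ++ ['*']
      else acc ++ [(PySem.List.pyGet? cs i).getD ' ']) []
  String.ofList newWord

-- ===== PORT B =====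
-- hand port of the slice assignment chars[1::2] = stars: walk the list two at a time,
-- keeping the even-index element and taking the next star for the odd index
def assignOdd : List Char → List Char → List Char
  | [], _ => []
  | [c], _ => [c]
  | c :: d :: rest, [] => c :: d :: assignOdd rest []   -- unreachable: stars never run out
  | c :: _ :: rest, s :: ss => c :: s :: assignOdd rest ss

def convert_alt (word : String) : String :=
  let chars := word.toList
  let stars := List.replicate (PySem.Int.floordiv (chars.length : Int) 2).toNat '*'
  String.ofList (assignOdd chars stars)

-- ===== PRECONDITION & SPEC =====
def Spec_convert (word : String) (out : String) : Prop := out = convert_alt word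
instance (word : String) (out : String) : Decidable (Spec_convert word out) := by unfold Spec_convert; infer_instance

-- ===== CLAIM (what is proved, stated in full; the proofs are below) =====
def Claim_equal_convert : Prop := ∀ (word : String), Dom_convert word → Spec_convert word (convert word)

-- ===== LEMMAS AND PROOFS =====

theorem assignOdd_length : ∀ (cs ss : List Char), (assignOdd cs ss).length = cs.length
  | [], _ => rfl
  | [_], _ => rfl
  | _ :: _ :: rest, [] => by simp [assignOdd, assignOdd_length rest []]
  | _ :: _ :: rest, _ :: ss => by simp [assignOdd, assignOdd_length rest ss]

-- elementwise characterisation of B with enough stars: odd positions become '*'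
theorem assignOdd_get : ∀ (cs : List Char) (k : Nat), cs.length / 2 ≤ k →
    ∀ (i : Nat) (h : i < cs.length),
      (assignOdd cs (List.replicate k '*'))[i]'(by rw [assignOdd_length]; exact h)
        = if i % 2 = 1 then '*' else cs[i]
  | [], _, _, i, h => by simp at h
  | [c], _, _, i, h => by
      obtain rfl : i = 0 := by simp at h; omega
      simp [assignOdd]
  | c :: d :: rest, k, hk, i, h => by
      have hk1 : 1 ≤ k := le_trans (by simp; omega) hk
      obtain ⟨k', rfl⟩ : ∃ k', k = k' + 1 := ⟨k - 1, by omega⟩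
      have hk' : rest.length / 2 ≤ k' := by simp at hk; omega
      match i with
      | 0 => simp [List.replicate_succ, assignOdd]
      | 1 => simp [List.replicate_succ, assignOdd]
      | (i + 2) =>
        have hi : i < rest.length := by simpa using h
        have ih := assignOdd_get rest k' hk' i hi
        simp only [List.replicate_succ, assignOdd]
        simp only [List.getElem_cons_succ]
        rw [ih]
        have : (i + 2) % 2 = i % 2 := by omega
        simp [this]

-- A's fold is the map of the per-index character over range(len)
theorem convertA_eq_map (cs : List Char) :
    (PySem.List.pyRange 0 (cs.length : Int) 1).foldl
      (fun acc i =>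
        if PySem.Int.mod i 2 ≠ 0 then acc ++ ['*']
        else acc ++ [(PySem.List.pyGet? cs i).getD ' ']) []
    = (List.range cs.length).map (fun i => if i % 2 = 1 then '*' else cs[i]!) := by
  have hbody : (fun (acc : List Char) (i : Int) =>
        if PySem.Int.mod i 2 ≠ 0 then acc ++ ['*']
        else acc ++ [(PySem.List.pyGet? cs i).getD ' '])
      = fun acc i => acc ++ [if PySem.Int.mod i 2 ≠ 0 then '*' else (PySem.List.pyGet? cs i).getD ' '] := by
    funext acc i; split <;> rfl
  rw [hbody, PySem.List.foldl_append_singleton_eq_map, PySem.List.pyRange_one]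
  simp only [sub_zero, Int.toNat_natCast, List.map_map]
  apply List.map_congr_left
  intro i hi
  have hi' : i < cs.length := List.mem_range.mp hi
  simp only [Function.comp, zero_add]
  rw [PySem.Int.mod_eq_emod_of_pos (by omega), PySem.List.pyGet?_natCast]
  have : cs[i]? = some cs[i] := List.getElem?_eq_getElem hi'
  rw [this]
  by_cases hc : i % 2 = 1
  · have h2 : ((i : Int) % 2 ≠ 0) := by omega
    simp [hc, h2]
  · have h2 : ¬ ((i : Int) % 2 ≠ 0) := by omega
    simp [h2, hc, List.getElem!_eq_getElem?_getD, List.getElem?_eq_getElem hi']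

-- ===== VERDICT (by name: the statement is the Claim_ definition above) =====
theorem convert_spec : Claim_equal_convert := by
  intro word _
  unfold Spec_convert convert convert_alt
  set cs := word.toList with hcs
  simp only []
  rw [convertA_eq_map]
  congr 1
  have hk : (PySem.Int.floordiv (cs.length : Int) 2).toNat = cs.length / 2 := by
    rw [PySem.Int.floordiv_eq_ediv_of_pos (by omega)]; omega
  rw [hk]
  apply List.ext_getElem
  · simp [assignOdd_length]
  · intro i h1 h2
    rw [assignOdd_get cs (cs.length / 2) le_rfl i (by simpa [assignOdd_length] using h2)]
    have hi : i < cs.length := by simpa [assignOdd_length] using h2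
    simp [List.getElem!_eq_getElem?_getD, List.getElem?_eq_getElem hi]
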